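-- pv_equiv track=rewrite | github.com/Uiopio/RaspberryPioneer | main.py | trajectory_generation
-- ===== SOURCE A (Python) =====
-- def trajectory_generation(point1, point2, z, dx = 1, dy = 1):
--     coordinates = [] # лист выходных координат
--
--     # начальная точка создания траектории
--     x = point1[0]
--     y = point1[1]
--
--     # "переключатели"
--     x_step = True
--     y_step = True
--
--     # сохраняем нулевую точку
--     coordinates.append((x, y, z))
--     # множитель направления
--     turn = 1
--     while x_step:
--         while y_step:
--             y = y + dy * turn
--             if y >= point2[1]:
--                 turn = -1
--                 y_step = False
--             elif y <= point1[1]: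
--                 turn = 1
--                 y_step = False
--             coordinates.append((x, y, z))
--
--         x = x + dx
--         y_step = True
--         if x > point2[0]:
--             x_step = False
--             break
--         coordinates.append((x, y, z))
--     return coordinates
-- ===== SOURCE B (Python) =====
-- def trajectory_generation(point1, point2, z, dx = 1, dy = 1):
--     # closed-form rewrite: no while loops; column count and each sweep length
--     # are computed arithmetically, columns emitted with list comprehensions
--     x0, y0 = point1[0], point1[1]
--     x2, y2 = point2[0], point2[1]
--     coordinates = [(x0, y0, z)]
--     y, turn = y0, 1
--     ncols = 0 if x0 + dx > x2 else (x2 - x0) // dx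
--     for c in range(ncols + 1):
--         x = x0 + c * dx
--         if c > 0:
--             coordinates.append((x, y, z))
--         d = dy * turn
--         if y + d >= y2 or y + d <= y0:
--             j = 1
--         elif d > 0:
--             j = (y2 - y - 1) // d + 1
--         else:
--             j = (y - y0 - 1) // (-d) + 1
--         coordinates.extend((x, y + i * d, z) for i in range(1, j + 1))
--         y += j * d
--         turn = -1 if y >= y2 else 1
--     return coordinates
-- ===== Notes on version B (the rewrite author's own statement) =====
-- stated objective: alternative
-- what changed: Replaces A's nested while-loop state machine by a for-loop over a closed-form column count in which each serpentine sweep's length is computed by one floor division and its points are emitted with a range comprehension; Pre_ excludes only the inputs (dx <= 0 with point1[0]+dx <= point2[0]) on which A loops forever.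
import Mathlib
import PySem

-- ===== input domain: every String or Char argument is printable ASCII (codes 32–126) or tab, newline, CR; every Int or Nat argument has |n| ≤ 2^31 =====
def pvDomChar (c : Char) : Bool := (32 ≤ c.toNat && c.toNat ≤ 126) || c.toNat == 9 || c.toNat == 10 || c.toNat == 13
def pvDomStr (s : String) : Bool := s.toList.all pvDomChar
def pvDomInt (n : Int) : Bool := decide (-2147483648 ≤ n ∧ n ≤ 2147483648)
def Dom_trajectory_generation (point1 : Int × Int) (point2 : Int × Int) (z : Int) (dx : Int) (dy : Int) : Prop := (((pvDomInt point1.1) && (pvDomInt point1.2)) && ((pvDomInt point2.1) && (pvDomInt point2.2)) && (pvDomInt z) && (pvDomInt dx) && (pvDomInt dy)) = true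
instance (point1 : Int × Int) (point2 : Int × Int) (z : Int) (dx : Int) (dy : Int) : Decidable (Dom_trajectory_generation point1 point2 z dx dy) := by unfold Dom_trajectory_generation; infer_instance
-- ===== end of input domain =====

-- B replaces A's nested while-loop state machine by a for-loop over a closed-form
-- column count with each serpentine sweep's length computed by a division (objective:
-- alternative; same output order, return-value equivalence).

-- ===== PORT A =====
-- inner 'while y_step' loop of A; fuel makes the unbounded while structurally
-- recursive (the fuel passed at each call site is proved sufficient below)
def pvInnerA (y0 p2y dy x z : Int) : Nat → Int → Int → List (Int × Int × Int) → List (Int × Int × Int) × Int × Int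
  | 0, y, turn, acc => (acc, y, turn)
  | f + 1, y, turn, acc =>
    let y' := y + dy * turn
    if y' ≥ p2y then (acc ++ [(x, y', z)], y', -1)
    else if y' ≤ y0 then (acc ++ [(x, y', z)], y', 1)
    else pvInnerA y0 p2y dy x z f y' turn (acc ++ [(x, y', z)])

-- outer 'while x_step' loop of A (fueled; fuel proved sufficient under Pre_)
def pvOuterA (y0 p2x p2y dx dy z : Int) : Nat → Int → Int → Int → List (Int × Int × Int) → List (Int × Int × Int)
  | 0, _, _, _, acc => acc
  | f + 1, x, y, turn, acc =>
    let r := pvInnerA y0 p2y dy x z ((p2y - y).toNat + (y - y0).toNat + 1) y turn acc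
    let x' := x + dx
    if x' > p2x then r.1
    else pvOuterA y0 p2x p2y dx dy z f x' r.2.1 r.2.2 (r.1 ++ [(x', r.2.1, z)])

def trajectory_generation (point1 : Int × Int) (point2 : Int × Int) (z : Int) (dx : Int) (dy : Int) : List (Int × Int × Int) :=
  pvOuterA point1.2 point2.1 point2.2 dx dy z ((point2.1 - point1.1).toNat + 1)
    point1.1 point1.2 1 [(point1.1, point1.2, z)]

-- ===== PORT B =====
-- one serpentine sweep, emitted as a comprehension over range(1, j+1) with the
-- step count j computed arithmetically (Source B's if/elif/else)
def pvSweepB (y0 y2 dy x z y turn : Int) : List (Int × Int × Int) × Int × Int :=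
  let d := dy * turn
  let j : Int :=
    if y + d ≥ y2 ∨ y + d ≤ y0 then 1
    else if d > 0 then PySem.Int.floordiv (y2 - y - 1) d + 1
    else PySem.Int.floordiv (y - y0 - 1) (-d) + 1
  ((PySem.List.pyRange 1 (j + 1) 1).map (fun i => (x, y + i * d, z)), y + j * d,
   if y + j * d ≥ y2 then -1 else 1)

def trajectory_generation_alt (point1 : Int × Int) (point2 : Int × Int) (z : Int) (dx : Int) (dy : Int) : List (Int × Int × Int) :=
  let x0 := point1.1
  let y0 := point1.2
  let x2 := point2.1
  let y2 := point2.2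
  let ncols : Int := if x0 + dx > x2 then 0 else PySem.Int.floordiv (x2 - x0) dx
  ((PySem.List.pyRange 0 (ncols + 1) 1).foldl
    (fun (st : List (Int × Int × Int) × Int × Int) c =>
      let x := x0 + c * dx
      let coords := if c > 0 then st.1 ++ [(x, st.2.1, z)] else st.1
      let r := pvSweepB y0 y2 dy x z st.2.1 st.2.2
      (coords ++ r.1, r.2.1, r.2.2))
    ([(x0, y0, z)], y0, 1)).1

-- ===== PRECONDITION & SPEC =====
-- Pre_ excludes exactly the inputs on which A never returns: with dx ≤ 0 and
-- point1[0]+dx ≤ point2[0] the outer 'while x_step' loop never reaches its exit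
-- condition and A loops forever.
def Pre_trajectory_generation (point1 : Int × Int) (point2 : Int × Int) (z : Int) (dx : Int) (dy : Int) : Prop :=
  1 ≤ dx ∨ point2.1 < point1.1 + dx
instance (point1 : Int × Int) (point2 : Int × Int) (z : Int) (dx : Int) (dy : Int) : Decidable (Pre_trajectory_generation point1 point2 z dx dy) := by unfold Pre_trajectory_generation; infer_instance

def pvWitness_trajectory_generation : (Int × Int) × (Int × Int) × Int × Int × Int := ((0, 0), (3, 4), 5, 1, 2)

def Spec_trajectory_generation (point1 : Int × Int) (point2 : Int × Int) (z : Int) (dx : Int) (dy : Int) (out : List (Int × Int × Int)) : Prop := out = trajectory_generation_alt point1 point2 z dx dy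
instance (point1 : Int × Int) (point2 : Int × Int) (z : Int) (dx : Int) (dy : Int) (out : List (Int × Int × Int)) : Decidable (Spec_trajectory_generation point1 point2 z dx dy out) := by unfold Spec_trajectory_generation; infer_instance

-- ===== CLAIM (what is proved, stated in full; the proofs are below) =====
def Claim_equal_trajectory_generation : Prop := ∀ (point1 : Int × Int) (point2 : Int × Int) (z : Int) (dx : Int) (dy : Int), Dom_trajectory_generation point1 point2 z dx dy → Pre_trajectory_generation point1 point2 z dx dy → Spec_trajectory_generation point1 point2 z dx dy (trajectory_generation point1 point2 z dx dy)

-- ===== LEMMAS AND PROOFS =====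

-- arithmetic facts about floor division (positive divisor)
lemma pvFdivSub (a d : Int) (hd : 0 < d) :
    PySem.Int.floordiv (a - d) d = PySem.Int.floordiv a d - 1 := by
  have h : a - d = a + (-1) * d := by ring
  rw [h, PySem.Int.floordiv_eq_ediv_of_pos hd, PySem.Int.floordiv_eq_ediv_of_pos hd,
    Int.add_mul_ediv_right _ _ (by omega : d ≠ 0)]
  ring

lemma pvFdivOne (a d : Int) (hd : 0 < d) (h1 : d ≤ a) (h2 : a < 2 * d) :
    PySem.Int.floordiv a d = 1 := by
  rw [PySem.Int.floordiv_eq_iff_of_pos hd]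
  constructor <;> linarith

lemma pvFdivPos (a d : Int) (hd : 0 < d) (h1 : d ≤ a) :
    1 ≤ PySem.Int.floordiv a d := by
  rw [PySem.Int.le_floordiv_iff_mul_le hd]
  linarith

-- the comprehension over range(1, j+2) peels its first point
lemma pvRampShift (x z y d j : Int) (hj : 1 ≤ j) :
    (PySem.List.pyRange 1 (j + 1 + 1) 1).map (fun i => (x, y + i * d, z)) =
      (x, y + d, z) :: (PySem.List.pyRange 1 (j + 1) 1).map (fun i => (x, y + d + i * d, z)) := by
  rw [PySem.List.pyRange_one, PySem.List.pyRange_one]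
  have h1 : (j + 1 + 1 - 1).toNat = (j + 1 - 1).toNat + 1 := by omega
  rw [h1, List.range_succ_eq_map]
  simp only [List.map_cons, List.map_map]
  congr 1
  · norm_num
  · refine List.map_congr_left ?_
    intro k _
    simp only [Function.comp]
    refine Prod.ext (rfl) (Prod.ext ?_ rfl)
    push_cast
    ring

lemma pvRampOne (x z y d : Int) :
    (PySem.List.pyRange 1 (1 + 1) 1).map (fun i => (x, y + i * d, z)) = [(x, y + d, z)] := by
  rw [PySem.List.pyRange_one_singleton]
  simp

-- components of pvSweepB
lemma pvSweepTurn (y0 y2 dy x z y turn : Int) :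
    (pvSweepB y0 y2 dy x z y turn).2.2 = 1 ∨ (pvSweepB y0 y2 dy x z y turn).2.2 = -1 := by
  unfold pvSweepB
  dsimp only
  exact Or.symm (ite_eq_or_eq _ _ _)

lemma pvSweepYZero (y0 y2 dy x z y turn : Int) (h : dy = 0) :
    (pvSweepB y0 y2 dy x z y turn).2.1 = y := by
  unfold pvSweepB
  dsimp only
  simp only [h, zero_mul, mul_zero, add_zero]

-- one-step sweep (the stop condition already holds after one step)
lemma pvSweepStep (y0 y2 dy x z y turn : Int) (h : y + dy * turn ≥ y2 ∨ y + dy * turn ≤ y0) :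
    pvSweepB y0 y2 dy x z y turn =
      ([(x, y + dy * turn, z)], y + dy * turn,
       if y + dy * turn ≥ y2 then (-1 : Int) else 1) := by
  unfold pvSweepB
  dsimp only
  rw [if_pos h, pvRampOne, one_mul]

-- unfolding one step of an upward sweep
lemma pvSweepUpRec (y0 y2 dy x z y turn : Int) (hd : 0 < dy * turn)
    (h1 : ¬ y + dy * turn ≥ y2) (h2 : ¬ y + dy * turn ≤ y0) :
    pvSweepB y0 y2 dy x z y turn =
      ((x, y + dy * turn, z) :: (pvSweepB y0 y2 dy x z (y + dy * turn) turn).1,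
       (pvSweepB y0 y2 dy x z (y + dy * turn) turn).2.1,
       (pvSweepB y0 y2 dy x z (y + dy * turn) turn).2.2) := by
  obtain ⟨d, hD⟩ : ∃ d, dy * turn = d := ⟨_, rfl⟩
  rw [hD] at hd h1 h2
  unfold pvSweepB
  dsimp only
  rw [hD]
  rw [if_neg (by tauto : ¬ (y + d ≥ y2 ∨ y + d ≤ y0)), if_pos hd]
  by_cases hC : y + d + d ≥ y2
  · rw [if_pos (Or.inl hC : y + d + d ≥ y2 ∨ y + d + d ≤ y0)]
    have hj : PySem.Int.floordiv (y2 - y - 1) d = 1 :=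
      pvFdivOne _ _ hd (by omega) (by omega)
    rw [hj, pvRampShift x z y d 1 (le_refl 1)]
    have h4 : y + (1 + 1) * d = y + d + d := by ring
    rw [h4, one_mul]
  · have hC2 : ¬ y + d + d ≤ y0 := by omega
    rw [if_neg (by tauto : ¬ (y + d + d ≥ y2 ∨ y + d + d ≤ y0)), if_pos hd]
    have hfp : 1 ≤ PySem.Int.floordiv (y2 - (y + d) - 1) d := pvFdivPos _ _ hd (by omega)
    have hj : PySem.Int.floordiv (y2 - y - 1) d = PySem.Int.floordiv (y2 - (y + d) - 1) d + 1 := by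
      have hs := pvFdivSub (y2 - y - 1) d hd
      have harg : y2 - (y + d) - 1 = y2 - y - 1 - d := by ring
      rw [harg, hs]
      ring
    rw [hj, pvRampShift x z y d _ (by omega)]
    have h4 : y + (PySem.Int.floordiv (y2 - (y + d) - 1) d + 1 + 1) * d
        = y + d + (PySem.Int.floordiv (y2 - (y + d) - 1) d + 1) * d := by ring
    rw [h4]

-- unfolding one step of a downward sweep
lemma pvSweepDownRec (y0 y2 dy x z y turn : Int) (hd : dy * turn < 0)
    (h1 : ¬ y + dy * turn ≥ y2) (h2 : ¬ y + dy * turn ≤ y0) :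
    pvSweepB y0 y2 dy x z y turn =
      ((x, y + dy * turn, z) :: (pvSweepB y0 y2 dy x z (y + dy * turn) turn).1,
       (pvSweepB y0 y2 dy x z (y + dy * turn) turn).2.1,
       (pvSweepB y0 y2 dy x z (y + dy * turn) turn).2.2) := by
  obtain ⟨d, hD⟩ : ∃ d, dy * turn = d := ⟨_, rfl⟩
  rw [hD] at hd h1 h2
  unfold pvSweepB
  dsimp only
  rw [hD]
  rw [if_neg (by tauto : ¬ (y + d ≥ y2 ∨ y + d ≤ y0)), if_neg (by omega : ¬ 0 < d)]
  by_cases hC : y + d + d ≤ y0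
  · rw [if_pos (Or.inr hC : y + d + d ≥ y2 ∨ y + d + d ≤ y0)]
    have hj : PySem.Int.floordiv (y - y0 - 1) (-d) = 1 :=
      pvFdivOne _ _ (by omega) (by omega) (by omega)
    rw [hj, pvRampShift x z y d 1 (le_refl 1)]
    have h4 : y + (1 + 1) * d = y + d + d := by ring
    rw [h4, one_mul]
  · have hC2 : ¬ y + d + d ≥ y2 := by omega
    rw [if_neg (by tauto : ¬ (y + d + d ≥ y2 ∨ y + d + d ≤ y0)), if_neg (by omega : ¬ 0 < d)]
    have hfp : 1 ≤ PySem.Int.floordiv (y + d - y0 - 1) (-d) := pvFdivPos _ _ (by omega) (by omega)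
    have hj : PySem.Int.floordiv (y - y0 - 1) (-d) = PySem.Int.floordiv (y + d - y0 - 1) (-d) + 1 := by
      have hs := pvFdivSub (y - y0 - 1) (-d) (by omega)
      have harg : y + d - y0 - 1 = y - y0 - 1 - -d := by ring
      rw [harg, hs]
      ring
    rw [hj, pvRampShift x z y d _ (by omega)]
    have h4 : y + (PySem.Int.floordiv (y + d - y0 - 1) (-d) + 1 + 1) * d
        = y + d + (PySem.Int.floordiv (y + d - y0 - 1) (-d) + 1) * d := by ring
    rw [h4]

-- A's inner while-loop equals B's closed-form sweep: upward case
lemma pvInnerUp (y0 p2y dy x z turn : Int) (hd : 0 < dy * turn) :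
    ∀ (f : Nat) (y : Int) (acc : List (Int × Int × Int)), (p2y - y).toNat < f →
      pvInnerA y0 p2y dy x z f y turn acc =
        (acc ++ (pvSweepB y0 p2y dy x z y turn).1,
         (pvSweepB y0 p2y dy x z y turn).2.1,
         (pvSweepB y0 p2y dy x z y turn).2.2) := by
  intro f
  induction f with
  | zero => intro y acc h; omega
  | succ f ih =>
    intro y acc hfuel
    unfold pvInnerA
    dsimp only
    by_cases h1 : y + dy * turn ≥ p2y
    · rw [if_pos h1, pvSweepStep y0 p2y dy x z y turn (Or.inl h1), if_pos h1]
    · rw [if_neg h1]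
      by_cases h2 : y + dy * turn ≤ y0
      · rw [if_pos h2, pvSweepStep y0 p2y dy x z y turn (Or.inr h2), if_neg h1]
      · rw [if_neg h2]
        have hfuel' : (p2y - (y + dy * turn)).toNat < f := by
          obtain ⟨d, hD⟩ : ∃ d, dy * turn = d := ⟨_, rfl⟩
          rw [hD] at hd h1 ⊢
          omega
        rw [ih (y + dy * turn) (acc ++ [(x, y + dy * turn, z)]) hfuel',
          pvSweepUpRec y0 p2y dy x z y turn hd h1 h2]
        simp [List.append_assoc]

-- downward case
lemma pvInnerDown (y0 p2y dy x z turn : Int) (hd : dy * turn < 0) :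
    ∀ (f : Nat) (y : Int) (acc : List (Int × Int × Int)), (y - y0).toNat < f →
      pvInnerA y0 p2y dy x z f y turn acc =
        (acc ++ (pvSweepB y0 p2y dy x z y turn).1,
         (pvSweepB y0 p2y dy x z y turn).2.1,
         (pvSweepB y0 p2y dy x z y turn).2.2) := by
  intro f
  induction f with
  | zero => intro y acc h; omega
  | succ f ih =>
    intro y acc hfuel
    unfold pvInnerA
    dsimp only
    by_cases h1 : y + dy * turn ≥ p2y
    · rw [if_pos h1, pvSweepStep y0 p2y dy x z y turn (Or.inl h1), if_pos h1]
    · rw [if_neg h1]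
      by_cases h2 : y + dy * turn ≤ y0
      · rw [if_pos h2, pvSweepStep y0 p2y dy x z y turn (Or.inr h2), if_neg h1]
      · rw [if_neg h2]
        have hfuel' : ((y + dy * turn) - y0).toNat < f := by
          obtain ⟨d, hD⟩ : ∃ d, dy * turn = d := ⟨_, rfl⟩
          rw [hD] at hd h1 ⊢
          omega
        rw [ih (y + dy * turn) (acc ++ [(x, y + dy * turn, z)]) hfuel',
          pvSweepDownRec y0 p2y dy x z y turn hd h1 h2]
        simp [List.append_assoc]

-- stationary case (dy = 0; only reachable with y already at a stop)
lemma pvInnerZero (y0 p2y dy x z turn : Int) (hd : dy * turn = 0)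
    (y : Int) (hstop : y ≥ p2y ∨ y ≤ y0) :
    ∀ (f : Nat) (acc : List (Int × Int × Int)), 0 < f →
      pvInnerA y0 p2y dy x z f y turn acc =
        (acc ++ (pvSweepB y0 p2y dy x z y turn).1,
         (pvSweepB y0 p2y dy x z y turn).2.1,
         (pvSweepB y0 p2y dy x z y turn).2.2) := by
  intro f acc hf
  obtain ⟨f', rfl⟩ : ∃ f', f = f' + 1 := ⟨f - 1, by omega⟩
  unfold pvInnerA
  dsimp only
  rw [pvSweepStep y0 p2y dy x z y turn (by rw [hd, add_zero]; exact hstop)]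
  rw [hd, add_zero]
  rcases hstop with hs | hs
  · rw [if_pos hs, if_pos hs]
  · by_cases hs2 : y ≥ p2y
    · rw [if_pos hs2, if_pos hs2]
    · rw [if_neg hs2, if_pos hs, if_neg hs2]

-- combined, at the fuel pvOuterA passes
lemma pvInnerEq (y0 p2y dy x z y turn : Int) (acc : List (Int × Int × Int))
    (ht : turn = 1 ∨ turn = -1) (hdy0 : dy = 0 → y ≥ p2y ∨ y ≤ y0) :
    pvInnerA y0 p2y dy x z ((p2y - y).toNat + (y - y0).toNat + 1) y turn acc =
      (acc ++ (pvSweepB y0 p2y dy x z y turn).1,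
       (pvSweepB y0 p2y dy x z y turn).2.1,
       (pvSweepB y0 p2y dy x z y turn).2.2) := by
  rcases lt_trichotomy (dy * turn) 0 with h | h | h
  · exact pvInnerDown y0 p2y dy x z turn h _ y acc (by omega)
  · refine pvInnerZero y0 p2y dy x z turn h y (hdy0 ?_) _ acc (by omega)
    rcases ht with ht | ht <;> rw [ht] at h <;> omega
  · exact pvInnerUp y0 p2y dy x z turn h _ y acc (by omega)

-- the columns after the current one, as B's fold emits them
def pvTail (y0 p2y dx dy z : Int) : Nat → Int → Int → Int → List (Int × Int × Int)
  | 0, _, _, _ => []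
  | n + 1, x, y, turn =>
    let r := pvSweepB y0 p2y dy (x + dx) z y turn
    (x + dx, y, z) :: r.1 ++ pvTail y0 p2y dx dy z n (x + dx) r.2.1 r.2.2

-- number of additional columns after the one at x
def pvN (p2x dx x : Int) : Nat :=
  if x + dx > p2x then 0 else (PySem.Int.floordiv (p2x - x) dx).toNat

lemma pvNSucc (p2x dx x : Int) (hdx : 1 ≤ dx) (h : x + dx ≤ p2x) :
    pvN p2x dx x = pvN p2x dx (x + dx) + 1 := by
  unfold pvN
  rw [if_neg (by omega : ¬ x + dx > p2x)]
  by_cases h2 : x + dx + dx > p2x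
  · rw [if_pos h2]
    have h3 : PySem.Int.floordiv (p2x - x) dx = 1 :=
      pvFdivOne _ _ (by omega) (by omega) (by omega)
    rw [h3]
    rfl
  · rw [if_neg h2]
    have hfp : 1 ≤ PySem.Int.floordiv (p2x - (x + dx)) dx := pvFdivPos _ _ (by omega) (by omega)
    have hj : PySem.Int.floordiv (p2x - x) dx = PySem.Int.floordiv (p2x - (x + dx)) dx + 1 := by
      have hs := pvFdivSub (p2x - x) dx (by omega)
      have harg : p2x - (x + dx) = p2x - x - dx := by ring
      rw [harg, hs]
      ring
    rw [hj]
    omega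

lemma pvNLe (p2x dx x : Int) (hdx : x + dx ≤ p2x → 1 ≤ dx) :
    pvN p2x dx x ≤ (p2x - x).toNat := by
  unfold pvN
  by_cases h : x + dx > p2x
  · rw [if_pos h]
    omega
  · rw [if_neg h]
    have hdx1 : 1 ≤ dx := hdx (by omega)
    rw [PySem.Int.floordiv_eq_ediv_of_pos (by omega)]
    have h2 := Int.ediv_le_self dx (by omega : (0:Int) ≤ p2x - x)
    omega

-- A's outer while-loop produces the sweep at x followed by pvTail
lemma pvOuterEq (y0 p2x p2y dx dy z : Int) :
    ∀ (f : Nat) (x y turn : Int) (acc : List (Int × Int × Int)),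
      (turn = 1 ∨ turn = -1) → (dy = 0 → y ≥ p2y ∨ y ≤ y0) →
      (x + dx ≤ p2x → 1 ≤ dx) → pvN p2x dx x < f →
      pvOuterA y0 p2x p2y dx dy z f x y turn acc =
        acc ++ (pvSweepB y0 p2y dy x z y turn).1 ++
          pvTail y0 p2y dx dy z (pvN p2x dx x) x
            (pvSweepB y0 p2y dy x z y turn).2.1 (pvSweepB y0 p2y dy x z y turn).2.2 := by
  intro f
  induction f with
  | zero =>
    intro x y turn acc ht hdy0 hdxc hfuel
    omega
  | succ f ih =>
    intro x y turn acc ht hdy0 hdxc hfuel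
    unfold pvOuterA
    dsimp only
    rw [pvInnerEq y0 p2y dy x z y turn acc ht hdy0]
    dsimp only
    by_cases hx : x + dx > p2x
    · rw [if_pos hx]
      have hN0 : pvN p2x dx x = 0 := by
        unfold pvN
        rw [if_pos hx]
      rw [hN0]
      simp [pvTail]
    · rw [if_neg hx]
      have hdx : 1 ≤ dx := hdxc (by omega)
      have hN := pvNSucc p2x dx x hdx (by omega)
      rw [ih (x + dx) (pvSweepB y0 p2y dy x z y turn).2.1 (pvSweepB y0 p2y dy x z y turn).2.2 _
        (pvSweepTurn y0 p2y dy x z y turn)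
        (fun h0 => by rw [pvSweepYZero y0 p2y dy x z y turn h0]; exact hdy0 h0)
        (fun _ => hdx) (by omega), hN]
      simp [pvTail, List.append_assoc]

-- B's fold over range(c0+1, c0+1+n) produces pvTail
lemma pvFoldEq (x0 y0 y2 z dx dy : Int) :
    ∀ (n : Nat) (c0 : Int), 0 ≤ c0 → ∀ (coords : List (Int × Int × Int)) (y turn : Int),
      ((PySem.List.pyRange (c0 + 1) (c0 + 1 + (n : Int)) 1).foldl
        (fun (st : List (Int × Int × Int) × Int × Int) c =>
          let x := x0 + c * dx
          let coords := if c > 0 then st.1 ++ [(x, st.2.1, z)] else st.1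
          let r := pvSweepB y0 y2 dy x z st.2.1 st.2.2
          (coords ++ r.1, r.2.1, r.2.2))
        (coords, y, turn)).1 = coords ++ pvTail y0 y2 dx dy z n (x0 + c0 * dx) y turn := by
  intro n
  induction n with
  | zero =>
    intro c0 hc0 coords y turn
    have hb : c0 + 1 + ((0 : Nat) : Int) = c0 + 1 := by push_cast; ring
    rw [hb, PySem.List.pyRange_one_eq_nil (le_refl _)]
    simp [pvTail]
  | succ n ih =>
    intro c0 hc0 coords y turn
    have hlt : c0 + 1 < c0 + 1 + ((n + 1 : Nat) : Int) := by push_cast; omega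
    rw [PySem.List.pyRange_one_cons hlt, List.foldl_cons]
    dsimp only
    rw [if_pos (by omega : c0 + 1 > 0)]
    have harg : c0 + 1 + ((n + 1 : Nat) : Int) = c0 + 1 + 1 + ((n : Nat) : Int) := by
      push_cast
      ring
    rw [harg, ih (c0 + 1) (by omega)]
    have hx : x0 + (c0 + 1) * dx = x0 + c0 * dx + dx := by ring
    rw [hx]
    simp [pvTail, List.append_assoc]

-- ===== VERDICT (by name: the statement is the Claim_ definition above) =====
theorem trajectory_generation_spec : Claim_equal_trajectory_generation := by
  intro p1 p2 z dx dy hdom hpre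
  unfold Pre_trajectory_generation at hpre
  unfold Spec_trajectory_generation trajectory_generation trajectory_generation_alt
  dsimp only
  have hdxc : p1.1 + dx ≤ p2.1 → 1 ≤ dx := by
    intro h
    rcases hpre with h1 | h1
    · exact h1
    · omega
  have hfuel : pvN p2.1 dx p1.1 < (p2.1 - p1.1).toNat + 1 := by
    have := pvNLe p2.1 dx p1.1 hdxc
    omega
  rw [pvOuterEq p1.2 p2.1 p2.2 dx dy z _ p1.1 p1.2 1 _ (Or.inl rfl)
    (fun _ => Or.inr (le_refl _)) hdxc hfuel]
  have hncols : (if p1.1 + dx > p2.1 then (0 : Int) else PySem.Int.floordiv (p2.1 - p1.1) dx)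
      = ((pvN p2.1 dx p1.1 : Nat) : Int) := by
    unfold pvN
    by_cases h : p1.1 + dx > p2.1
    · rw [if_pos h, if_pos h]
      rfl
    · rw [if_neg h, if_neg h]
      have hdx1 : 1 ≤ dx := hdxc (by omega)
      have hfp : 1 ≤ PySem.Int.floordiv (p2.1 - p1.1) dx := pvFdivPos _ _ (by omega) (by omega)
      omega
  rw [hncols]
  rw [PySem.List.pyRange_one_cons (by omega : (0 : Int) < ((pvN p2.1 dx p1.1 : Nat) : Int) + 1),
    List.foldl_cons]
  dsimp only
  rw [if_neg (by omega : ¬ (0 : Int) > 0)]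
  have hx0 : p1.1 + 0 * dx = p1.1 := by ring
  rw [hx0]
  have hb : ((pvN p2.1 dx p1.1 : Nat) : Int) + 1 = 0 + 1 + ((pvN p2.1 dx p1.1 : Nat) : Int) := by
    ring
  rw [hb, pvFoldEq p1.1 p1.2 p2.2 z dx dy (pvN p2.1 dx p1.1) 0 (le_refl 0), hx0]
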